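-- pv_equiv track=rewrite | github.com/rish106/COL106 | a1/a1.py | countBrackets
-- ===== SOURCE A (Python) =====
-- def countBrackets(string):
--     n = len(string)
--     brackets = 0
--     for i in range(n):
--         if (string[i] == '('):
--             brackets += 1
--         elif (string[i] == ')'):
--             brackets -= 1
--     return brackets
-- ===== SOURCE B (Python) =====
-- def countBrackets(string):
--     return string.count('(') - string.count(')')
-- ===== Notes on version B (the rewrite author's own statement) =====
-- stated objective: idiomatic
-- what changed: Replaces the single index-based pass with one +1/-1 accumulator by two independent .count scans whose results are subtracted.
import Mathlib
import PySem

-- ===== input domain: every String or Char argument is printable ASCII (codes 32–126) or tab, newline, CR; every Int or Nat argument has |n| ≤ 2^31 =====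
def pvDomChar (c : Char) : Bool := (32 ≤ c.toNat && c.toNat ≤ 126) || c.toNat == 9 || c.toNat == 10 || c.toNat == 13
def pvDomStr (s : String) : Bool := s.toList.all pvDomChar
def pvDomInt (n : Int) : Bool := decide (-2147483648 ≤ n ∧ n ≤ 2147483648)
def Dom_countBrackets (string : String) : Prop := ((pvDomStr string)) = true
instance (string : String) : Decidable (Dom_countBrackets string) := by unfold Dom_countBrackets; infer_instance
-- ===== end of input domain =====

-- B computes the same net bracket count with two independent .count scans subtracted,
-- instead of A's single index loop with one +1/-1 accumulator (idiomatic; same cost).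

-- ===== PORT A =====
-- for i in range(n): if string[i]=='(' : brackets += 1 elif string[i]==')' : brackets -= 1
def countBrackets (string : String) : Int :=
  let cs := string.toList
  (PySem.List.pyRange 0 (cs.length : Int) 1).foldl
    (fun brackets i =>
      let c := PySem.List.pyGetD cs i ' '
      if c = '(' then brackets + 1
      else if c = ')' then brackets - 1
      else brackets) 0

-- ===== PORT B =====
-- return string.count('(') - string.count(')')
def countBrackets_alt (string : String) : Int :=
  (PySem.Str.count string "(" : Int) - (PySem.Str.count string ")" : Int)

-- ===== PRECONDITION & SPEC =====
def Spec_countBrackets (string : String) (out : Int) : Prop := out = countBrackets_alt string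
instance (string : String) (out : Int) : Decidable (Spec_countBrackets string out) := by unfold Spec_countBrackets; infer_instance

-- ===== CLAIM (what is proved, stated in full; the proofs are below) =====
def Claim_equal_countBrackets : Prop := ∀ (string : String), Dom_countBrackets string → Spec_countBrackets string (countBrackets string)

-- ===== LEMMAS AND PROOFS =====

-- Python str.count with a single-character needle is List.count on the code points.
theorem pvCountGo_single (c : Char) (s : List Char) : ∀ (fuel acc : Nat), s.length ≤ fuel →
    PySem.Chars.count.go [c] fuel s acc = acc + s.count c := by
  induction s with
  | nil => intro fuel acc _; cases fuel <;> simp [PySem.Chars.count.go]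
  | cons h t ih =>
    intro fuel acc hf
    cases fuel with
    | zero => simp at hf
    | succ f =>
      simp only [PySem.Chars.count.go]
      by_cases hc : h = c
      · subst hc
        simp [List.isPrefixOf, ih f (acc + 1) (by simpa using hf)]
        omega
      · simp [List.isPrefixOf, hc, Ne.symm hc, ih f acc (by simpa using hf)]

theorem pvCount_single (c : Char) (s : List Char) : PySem.Chars.count s [c] = s.count c := by
  simpa [PySem.Chars.count] using pvCountGo_single c s s.length 0 le_rfl

-- A's accumulator loop computes acc + (#'(' − #')').
theorem pvFoldl_net (cs : List Char) : ∀ (b : Int),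
    cs.foldl (fun brackets c =>
      if c = '(' then brackets + 1
      else if c = ')' then brackets - 1
      else brackets) b = b + (cs.count '(' : Int) - (cs.count ')' : Int) := by
  induction cs with
  | nil => intro b; simp
  | cons h t ih =>
    intro b
    simp only [List.foldl_cons, List.count_cons, ih]
    by_cases h1 : h = '('
    · simp [h1]; ring
    · by_cases h2 : h = ')'
      · simp [h2]; ring
      · simp [h1, h2]

-- ===== VERDICT (by name: the statement is the Claim_ definition above) =====
theorem countBrackets_spec : Claim_equal_countBrackets := by
  intro s _
  unfold Spec_countBrackets countBrackets countBrackets_alt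
  rw [PySem.List.foldl_pyRange_zero_pyGetD' s.toList ' '
        (fun brackets c =>
          if c = '(' then brackets + 1
          else if c = ')' then brackets - 1
          else brackets) 0]
  rw [pvFoldl_net s.toList 0]
  simp [PySem.Str.count_eq, pvCount_single]
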